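-- pv_equiv track=rewrite | github.com/Wenzhi-Ding/coding_notes | 10_LeetCode/L1774-closest-dessert-cost.py | closestCost
-- ===== SOURCE A (Python) =====
-- import bisect
--
-- def closestCost(baseCosts, toppingCosts, target):
--
--     # 穷举
--     toppingSum = set([0])
--     for i in toppingCosts * 2:  # 快速求排列组合
--         toppingSum |= set([s + i for s in toppingSum])
--     toppingSum = sorted(list(toppingSum))
--     l = len(toppingSum)
--
--     # 二分查找
--     ans = 1000000007
--     for c in baseCosts:
--         i = bisect.bisect_right(toppingSum, target - c)
--         if i > 0 and abs(c + toppingSum[i - 1] - target) < abs(ans - target): ans = c + toppingSum[i - 1]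
--         if i < l and abs(c + toppingSum[i] - target) < abs(ans - target): ans = c + toppingSum[i]
--     return ans
-- ===== SOURCE B (Python) =====
-- def closestCost(baseCosts, toppingCosts, target):
--     # achievable topping totals as a sorted duplicate-free list, built by recursion:
--     # take 0, 1 or 2 of each topping, merging the three shifted sorted lists
--     def merge(xs, ys):
--         out = []
--         i = j = 0
--         while i < len(xs) and j < len(ys):
--             if xs[i] < ys[j]:
--                 out.append(xs[i]); i += 1
--             elif ys[j] < xs[i]:
--                 out.append(ys[j]); j += 1
--             else:
--                 out.append(xs[i]); i += 1; j += 1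
--         return out + xs[i:] + ys[j:]
--
--     def sums(ts):
--         if not ts:
--             return [0]
--         rest = sums(ts[1:])
--         t = ts[0]
--         return merge(merge(rest, [s + t for s in rest]), [s + 2 * t for s in rest])
--
--     cands = sums(toppingCosts)
--     best = 1000000007
--     for c in baseCosts:
--         for s in cands:
--             if abs(c + s - target) < abs(best - target):
--                 best = c + s
--     return best
-- ===== Notes on version B (the rewrite author's own statement) =====
-- stated objective: simpler
-- what changed: A grows the set of topping totals by folding a union step over the toppings list concatenated with itself and then binary-searches (bisect_right) the two nearest totals per base; B enumerates the totals directly by recursion choosing 0, 1 or 2 of each topping and does a plain linear scan of the sorted totals per base with a strict-improvement update.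
import Mathlib
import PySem

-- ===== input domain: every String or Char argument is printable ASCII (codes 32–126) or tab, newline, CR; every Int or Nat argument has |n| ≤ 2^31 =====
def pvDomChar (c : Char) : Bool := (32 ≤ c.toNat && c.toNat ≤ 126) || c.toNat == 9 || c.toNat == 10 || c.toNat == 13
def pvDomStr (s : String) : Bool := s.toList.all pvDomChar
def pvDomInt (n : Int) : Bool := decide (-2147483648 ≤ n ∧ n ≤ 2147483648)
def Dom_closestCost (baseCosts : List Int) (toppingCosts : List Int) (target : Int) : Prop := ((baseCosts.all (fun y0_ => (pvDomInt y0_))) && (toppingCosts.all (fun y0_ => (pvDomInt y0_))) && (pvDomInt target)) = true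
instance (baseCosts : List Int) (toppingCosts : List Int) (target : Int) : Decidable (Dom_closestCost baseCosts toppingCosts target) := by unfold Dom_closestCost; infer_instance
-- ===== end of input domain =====

-- B replaces A's set-doubling growth (union step over the toppings list concatenated with
-- itself, then sort + per-base binary search) by a direct recursion merging the 0/1/2-copy
-- shifted sorted total lists and a plain linear scan per base (objective: simpler; not faster).

-- ===== PORT A =====
-- Python's `set` of topping totals is modelled EXACTLY as a strictly-sorted duplicate-free
-- list (A only tests membership of / sorts the set, so its hash iteration order is
-- unobservable); `s | set(...)` is then a duplicate-dropping merge of two sorted lists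
-- (tail-recursive runner below), and `sorted(list(s))` is List.mergeSort (Python's stable sort).
def pvMergeGo : List Int → List Int → List Int → List Int
  | acc, [], ys => acc.reverse ++ ys
  | acc, x :: xs, [] => acc.reverse ++ x :: xs
  | acc, x :: xs, y :: ys =>
    if x < y then pvMergeGo (x :: acc) xs (y :: ys)
    else if y < x then pvMergeGo (y :: acc) (x :: xs) ys
    else pvMergeGo (x :: acc) xs ys
termination_by _ xs ys => xs.length + ys.length

def pvMergeUnion (xs ys : List Int) : List Int := pvMergeGo [] xs ys

def closestCost (baseCosts : List Int) (toppingCosts : List Int) (target : Int) : Int :=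
  -- toppingSum = set([0]); for i in toppingCosts * 2: toppingSum |= set([s + i for s in toppingSum])
  let toppingSum :=
    (toppingCosts ++ toppingCosts).foldl
      (fun S i => pvMergeUnion S (S.map (fun s => s + i))) [0]
  -- toppingSum = sorted(list(toppingSum)); l = len(toppingSum)
  let ts := toppingSum.mergeSort (fun a b => decide (a ≤ b))
  let l := ts.length
  baseCosts.foldl
    (fun ans c =>
      -- i = bisect.bisect_right(toppingSum, target - c)
      let i := PySem.List.bisectRight ts (target - c)
      -- indexing ts[i-1] / ts[i] is guarded by 0 < i / i < l, so `getD` is exact here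
      let ans := if 0 < i ∧ |c + ts.getD (i - 1) 0 - target| < |ans - target| then c + ts.getD (i - 1) 0 else ans
      if i < l ∧ |c + ts.getD i 0 - target| < |ans - target| then c + ts.getD i 0 else ans)
    1000000007

-- ===== PORT B =====
-- def sums(ts): if not ts: return [0]; rest = sums(ts[1:]); t = ts[0]
--               return merge(merge(rest, [s + t for s in rest]), [s + 2*t for s in rest])
-- (Source B's `merge` is the same two-pointer duplicate-dropping merge as pvMergeGo above)
def pvSums : List Int → List Int
  | [] => [0]
  | t :: r =>
    let rest := pvSums r
    pvMergeUnion (pvMergeUnion rest (rest.map (fun s => s + t))) (rest.map (fun s => s + 2 * t))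

def closestCost_alt (baseCosts : List Int) (toppingCosts : List Int) (target : Int) : Int :=
  let cands := pvSums toppingCosts
  baseCosts.foldl
    (fun best c =>
      cands.foldl (fun best s => if |c + s - target| < |best - target| then c + s else best) best)
    1000000007

-- ===== PRECONDITION & SPEC =====
def Spec_closestCost (baseCosts : List Int) (toppingCosts : List Int) (target : Int) (out : Int) : Prop := out = closestCost_alt baseCosts toppingCosts target
instance (baseCosts : List Int) (toppingCosts : List Int) (target : Int) (out : Int) : Decidable (Spec_closestCost baseCosts toppingCosts target out) := by unfold Spec_closestCost; infer_instance

-- ===== CLAIM (what is proved, stated in full; the proofs are below) =====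
def Claim_equal_closestCost : Prop := ∀ (baseCosts : List Int) (toppingCosts : List Int) (target : Int), Dom_closestCost baseCosts toppingCosts target → Spec_closestCost baseCosts toppingCosts target (closestCost baseCosts toppingCosts target)

-- ===== LEMMAS AND PROOFS =====

-- plain (non-accumulator) form of the merge, for reasoning
def pvMerge' : List Int → List Int → List Int
  | [], ys => ys
  | x :: xs, [] => x :: xs
  | x :: xs, y :: ys =>
    if x < y then x :: pvMerge' xs (y :: ys)
    else if y < x then y :: pvMerge' (x :: xs) ys
    else x :: pvMerge' xs ys
termination_by xs ys => xs.length + ys.length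

theorem pvMergeGo_eq (acc xs ys : List Int) :
    pvMergeGo acc xs ys = acc.reverse ++ pvMerge' xs ys := by
  fun_induction pvMergeGo acc xs ys with
  | case1 acc ys => rw [pvMerge']
  | case2 acc x xs => rw [pvMerge']
  | case3 acc x xs y ys h ih => rw [pvMerge'.eq_def]; simp [h, ih]
  | case4 acc x xs y ys h h' ih => rw [pvMerge'.eq_def]; simp [h, h', ih]
  | case5 acc x xs y ys h h' ih => rw [pvMerge'.eq_def]; simp [h, h', ih]

theorem pvMergeUnion_eq (xs ys : List Int) : pvMergeUnion xs ys = pvMerge' xs ys := by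
  rw [pvMergeUnion, pvMergeGo_eq]; rfl

theorem mem_pvMergeUnion (xs ys : List Int) (z : Int) :
    z ∈ pvMergeUnion xs ys ↔ z ∈ xs ∨ z ∈ ys := by
  rw [pvMergeUnion_eq]
  fun_induction pvMerge' xs ys with
  | case1 ys => simp
  | case2 x xs => simp
  | case3 x xs y ys h ih => simp only [List.mem_cons, ih]; tauto
  | case4 x xs y ys h h' ih => simp only [List.mem_cons, ih]; tauto
  | case5 x xs y ys h h' ih =>
    have hxy : x = y := by omega
    subst hxy
    simp only [List.mem_cons, ih]; tauto

theorem pairwise_pvMergeUnion (xs ys : List Int)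
    (hx : xs.Pairwise (· < ·)) (hy : ys.Pairwise (· < ·)) :
    (pvMergeUnion xs ys).Pairwise (· < ·) := by
  rw [pvMergeUnion_eq]
  fun_induction pvMerge' xs ys with
  | case1 ys => exact hy
  | case2 x xs => exact hx
  | case3 x xs y ys h ih =>
    rw [List.pairwise_cons] at hx
    refine List.pairwise_cons.2 ⟨?_, ih hx.2 hy⟩
    intro z hz
    rw [← pvMergeUnion_eq, mem_pvMergeUnion] at hz
    rcases hz with hz | hz
    · exact hx.1 z hz
    · rcases List.mem_cons.1 hz with rfl | hz
      · exact h
      · exact lt_trans h ((List.pairwise_cons.1 hy).1 z hz)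
  | case4 x xs y ys h h' ih =>
    rw [List.pairwise_cons] at hy
    refine List.pairwise_cons.2 ⟨?_, ih hx hy.2⟩
    intro z hz
    rw [← pvMergeUnion_eq, mem_pvMergeUnion] at hz
    rcases hz with hz | hz
    · rcases List.mem_cons.1 hz with rfl | hz
      · exact h'
      · exact lt_trans h' ((List.pairwise_cons.1 hx).1 z hz)
    · exact hy.1 z hz
  | case5 x xs y ys h h' ih =>
    have hxy : x = y := by omega
    subst hxy
    rw [List.pairwise_cons] at hx hy
    refine List.pairwise_cons.2 ⟨?_, ih hx.2 hy.2⟩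
    intro z hz
    rw [← pvMergeUnion_eq, mem_pvMergeUnion] at hz
    rcases hz with hz | hz
    · exact hx.1 z hz
    · exact hy.1 z hz

theorem pairwise_map_add (l : List Int) (i : Int) (h : l.Pairwise (· < ·)) :
    (l.map (fun s => s + i)).Pairwise (· < ·) := by
  rw [List.pairwise_map]
  exact h.imp (by intro a b hab; omega)

-- the per-base loop bodies of the two ports, named for the proofs
def pvStepA (ts : List Int) (target ans c : Int) : Int :=
  let i := PySem.List.bisectRight ts (target - c)
  let ans := if 0 < i ∧ |c + ts.getD (i - 1) 0 - target| < |ans - target| then c + ts.getD (i - 1) 0 else ans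
  if i < ts.length ∧ |c + ts.getD i 0 - target| < |ans - target| then c + ts.getD i 0 else ans

def pvStepB (ts : List Int) (target ans c : Int) : Int :=
  ts.foldl (fun best s => if |c + s - target| < |best - target| then c + s else best) ans

-- `Good ts c target ans r`: r is the unique outcome of "improve ans by the best candidate c + s,
-- s ∈ ts, preferring strictly closer to target, ties within ts toward the smaller s".
def pvGood (ts : List Int) (c target ans r : Int) : Prop :=
  (∀ s ∈ ts, ¬ (|c + s - target| < |r - target|)) ∧
  (r = ans ∨ ∃ s ∈ ts, r = c + s ∧ |r - target| < |ans - target| ∧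
      ∀ s' ∈ ts, |c + s' - target| = |r - target| → s ≤ s')

theorem pvGood_unique {ts : List Int} {c target ans r₁ r₂ : Int}
    (h₁ : pvGood ts c target ans r₁) (h₂ : pvGood ts c target ans r₂) : r₁ = r₂ := by
  obtain ⟨m₁, h₁⟩ := h₁; obtain ⟨m₂, h₂⟩ := h₂
  rcases h₁ with rfl | ⟨s₁, hs₁, rfl, hlt₁, htie₁⟩
  · rcases h₂ with rfl | ⟨s₂, hs₂, rfl, hlt₂, htie₂⟩
    · rfl
    · exact absurd hlt₂ (m₁ _ hs₂)
  · rcases h₂ with rfl | ⟨s₂, hs₂, rfl, hlt₂, htie₂⟩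
    · exact absurd hlt₁ (m₂ _ hs₁)
    · have k₁ : |c + s₁ - target| ≤ |c + s₂ - target| := not_lt.1 (m₁ _ hs₂)
      have k₂ : |c + s₂ - target| ≤ |c + s₁ - target| := not_lt.1 (m₂ _ hs₁)
      have e1 : |c + s₂ - target| = |c + s₁ - target| := le_antisymm k₂ k₁
      have h12 : s₁ ≤ s₂ := htie₁ _ hs₂ e1
      have h21 : s₂ ≤ s₁ := htie₂ _ hs₁ e1.symm
      omega

theorem pvStepB_good (ts : List Int) (c target ans : Int)
    (hs : ts.Pairwise (· ≤ ·)) : pvGood ts c target ans (pvStepB ts target ans c) := by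
  induction ts using List.reverseRecOn with
  | nil => exact ⟨by simp, Or.inl rfl⟩
  | append_singleton l a ih =>
    have hl : l.Pairwise (· ≤ ·) := hs.sublist (List.sublist_append_left l [a])
    have hla : ∀ y ∈ l, y ≤ a := by
      intro y hy
      exact (List.pairwise_append.1 hs).2.2 y hy a (List.mem_singleton_self a)
    obtain ⟨m', hd'⟩ := ih hl
    have hfold : pvStepB (l ++ [a]) target ans c =
        (if |c + a - target| < |pvStepB l target ans c - target| then c + a
         else pvStepB l target ans c) := by
      simp [pvStepB, List.foldl_append]
    have hr'le : |pvStepB l target ans c - target| ≤ |ans - target| := by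
      rcases hd' with h | ⟨s₁, _, e, hlt₁, _⟩
      · rw [h]
      · exact le_of_lt hlt₁
    rw [hfold]
    by_cases hlt : |c + a - target| < |pvStepB l target ans c - target|
    · rw [if_pos hlt]
      refine ⟨?_, Or.inr ⟨a, by simp, rfl, by linarith, ?_⟩⟩
      · intro s hsm
        rcases List.mem_append.1 hsm with h | h
        · have := not_lt.1 (m' s h); linarith
        · rw [List.mem_singleton.1 h]; exact lt_irrefl _
      · intro s' hs' he
        rcases List.mem_append.1 hs' with h | h
        · have := not_lt.1 (m' s' h); linarith
        · rw [List.mem_singleton.1 h]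
    · rw [if_neg hlt]
      refine ⟨?_, ?_⟩
      · intro s hsm
        rcases List.mem_append.1 hsm with h | h
        · exact m' s h
        · rw [List.mem_singleton.1 h]; exact hlt
      · rcases hd' with h | ⟨s₁, hs₁, e, hlt₁, htie₁⟩
        · exact Or.inl h
        · refine Or.inr ⟨s₁, List.mem_append_left _ hs₁, e, hlt₁, ?_⟩
          intro s' hs' he
          rcases List.mem_append.1 hs' with h | h
          · exact htie₁ s' h he
          · rw [List.mem_singleton.1 h]; exact hla s₁ hs₁

theorem pvStepA_def (ts : List Int) (target ans c : Int) : pvStepA ts target ans c =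
    (if PySem.List.bisectRight ts (target - c) < ts.length ∧
        |c + ts.getD (PySem.List.bisectRight ts (target - c)) 0 - target| <
          |(if 0 < PySem.List.bisectRight ts (target - c) ∧
               |c + ts.getD (PySem.List.bisectRight ts (target - c) - 1) 0 - target| < |ans - target|
            then c + ts.getD (PySem.List.bisectRight ts (target - c) - 1) 0 else ans) - target|
     then c + ts.getD (PySem.List.bisectRight ts (target - c)) 0
     else (if 0 < PySem.List.bisectRight ts (target - c) ∧
              |c + ts.getD (PySem.List.bisectRight ts (target - c) - 1) 0 - target| < |ans - target|
           then c + ts.getD (PySem.List.bisectRight ts (target - c) - 1) 0 else ans)) := rfl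

theorem pvStepA_good (ts : List Int) (c target ans : Int)
    (hs : ts.Pairwise (· ≤ ·)) : pvGood ts c target ans (pvStepA ts target ans c) := by
  obtain ⟨hle, hbef, haft⟩ := PySem.List.bisectRight_spec ts (target - c) hs
  rw [pvStepA_def]
  set i := PySem.List.bisectRight ts (target - c) with hidef
  have mono : ∀ (p q : Nat) (hp : p < ts.length) (hq : q < ts.length), p ≤ q → ts[p] ≤ ts[q] := by
    intro p q hp hq hpq
    rcases Nat.lt_or_ge p q with h | h
    · exact List.pairwise_iff_getElem.1 hs p q hp hq h
    · have : p = q := le_antisymm hpq h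
      subst this; exact le_refl _
  have memg : ∀ s ∈ ts, ∃ (j : Nat) (hj : j < ts.length), ts[j] = s := fun s hsm =>
    List.mem_iff_getElem.1 hsm
  have dL : ∀ s : Int, s ≤ target - c → |c + s - target| = (target - c) - s := by
    intro s h; rw [abs_of_nonpos (by linarith)]; ring
  have dR : ∀ s : Int, target - c < s → |c + s - target| = s - (target - c) := by
    intro s h; rw [abs_of_nonneg (by linarith)]; ring
  by_cases h0 : 0 < i <;> by_cases hl : i < ts.length
  · -- both neighbours exist
    have hi1 : i - 1 < ts.length := by omega
    have ha : ts.getD (i - 1) 0 = ts[i - 1] := List.getD_eq_getElem ts 0 hi1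
    have hb : ts.getD i 0 = ts[i] := List.getD_eq_getElem ts 0 hl
    have haLe : ts[i - 1] ≤ target - c := hbef (i - 1) hi1 (by omega)
    have hbGt : target - c < ts[i] := haft i hl (le_refl i)
    have haMax : ∀ s ∈ ts, s ≤ target - c → s ≤ ts[i - 1] := by
      intro s hsm hsle; obtain ⟨j, hj, rfl⟩ := memg s hsm
      rcases Nat.lt_or_ge j i with h | h
      · exact mono j (i - 1) hj hi1 (by omega)
      · exact absurd (haft j hj h) (by linarith)
    have hbMin : ∀ s ∈ ts, target - c < s → ts[i] ≤ s := by
      intro s hsm hsgt; obtain ⟨j, hj, rfl⟩ := memg s hsm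
      rcases Nat.lt_or_ge j i with h | h
      · exact absurd (hbef j hj h) (by linarith)
      · exact mono i j hl hj h
    have haMem : ts[i - 1] ∈ ts := List.getElem_mem hi1
    have hbMem : ts[i] ∈ ts := List.getElem_mem hl
    simp only [h0, hl, true_and, ha, hb]
    have bound : ∀ s ∈ ts, |c + ts[i - 1] - target| ≤ |c + s - target| ∨
        |c + ts[i] - target| ≤ |c + s - target| := by
      intro s hsm
      by_cases hsx : s ≤ target - c
      · left; rw [dL _ haLe, dL _ hsx]; have := haMax s hsm hsx; linarith
      · right
        rw [dR _ hbGt, dR _ (by linarith)]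
        have := hbMin s hsm (by linarith); linarith
    by_cases cda : |c + ts[i - 1] - target| < |ans - target|
    · rw [if_pos cda]
      by_cases cdb : |c + ts[i] - target| < |c + ts[i - 1] - target|
      · rw [if_pos cdb]
        refine ⟨?_, Or.inr ⟨ts[i], hbMem, rfl, by linarith, ?_⟩⟩
        · intro s hsm
          by_cases hsx : s ≤ target - c
          · have h1 : |c + ts[i - 1] - target| ≤ |c + s - target| := by
              rw [dL _ haLe, dL _ hsx]; have := haMax s hsm hsx; linarith
            linarith
          · rw [dR _ hbGt, dR _ (by linarith)]
            have := hbMin s hsm (by linarith); linarith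
        · intro s' hs' he
          by_cases hsx : s' ≤ target - c
          · exfalso
            have h1 : |c + ts[i - 1] - target| ≤ |c + s' - target| := by
              rw [dL _ haLe, dL _ hsx]; have := haMax s' hs' hsx; linarith
            rw [he] at h1; linarith
          · rw [dR _ hbGt] at he; rw [dR _ (by linarith : target - c < s')] at he; linarith
      · rw [if_neg cdb]
        refine ⟨?_, Or.inr ⟨ts[i - 1], haMem, rfl, cda, ?_⟩⟩
        · intro s hsm
          by_cases hsx : s ≤ target - c
          · rw [dL _ haLe, dL _ hsx]; have := haMax s hsm hsx; linarith
          · have h1 : |c + ts[i] - target| ≤ |c + s - target| := by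
              rw [dR _ hbGt, dR _ (by linarith)]
              have := hbMin s hsm (by linarith); linarith
            linarith
        · intro s' hs' he
          by_cases hsx : s' ≤ target - c
          · rw [dL _ haLe] at he; rw [dL _ hsx] at he; linarith
          · linarith [haLe, hsx]
    · rw [if_neg cda]
      by_cases cdb : |c + ts[i] - target| < |ans - target|
      · rw [if_pos cdb]
        refine ⟨?_, Or.inr ⟨ts[i], hbMem, rfl, cdb, ?_⟩⟩
        · intro s hsm
          by_cases hsx : s ≤ target - c
          · have h1 : |c + ts[i - 1] - target| ≤ |c + s - target| := by
              rw [dL _ haLe, dL _ hsx]; have := haMax s hsm hsx; linarith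
            linarith
          · rw [dR _ hbGt, dR _ (by linarith)]
            have := hbMin s hsm (by linarith); linarith
        · intro s' hs' he
          by_cases hsx : s' ≤ target - c
          · exfalso
            have h1 : |c + ts[i - 1] - target| ≤ |c + s' - target| := by
              rw [dL _ haLe, dL _ hsx]; have := haMax s' hs' hsx; linarith
            rw [he] at h1; linarith
          · rw [dR _ hbGt] at he; rw [dR _ (by linarith : target - c < s')] at he; linarith
      · rw [if_neg cdb]
        refine ⟨?_, Or.inl rfl⟩
        intro s hsm
        rcases bound s hsm with h | h <;> linarith
  · -- only the left neighbour: i = length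
    have hi1 : i - 1 < ts.length := by omega
    have ha : ts.getD (i - 1) 0 = ts[i - 1] := List.getD_eq_getElem ts 0 hi1
    have haLe : ts[i - 1] ≤ target - c := hbef (i - 1) hi1 (by omega)
    have haMax : ∀ s ∈ ts, s ≤ ts[i - 1] := by
      intro s hsm; obtain ⟨j, hj, rfl⟩ := memg s hsm
      exact mono j (i - 1) hj hi1 (by omega)
    have hallL : ∀ s ∈ ts, s ≤ target - c := fun s hsm => le_trans (haMax s hsm) haLe
    have haMem : ts[i - 1] ∈ ts := List.getElem_mem hi1
    simp only [h0, hl, true_and, false_and, if_false, ha]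
    by_cases cda : |c + ts[i - 1] - target| < |ans - target|
    · rw [if_pos cda]
      refine ⟨?_, Or.inr ⟨ts[i - 1], haMem, rfl, cda, ?_⟩⟩
      · intro s hsm
        rw [dL _ haLe, dL _ (hallL s hsm)]
        have := haMax s hsm; linarith
      · intro s' hs' he
        rw [dL _ haLe] at he; rw [dL _ (hallL s' hs')] at he; linarith
    · rw [if_neg cda]
      refine ⟨?_, Or.inl rfl⟩
      intro s hsm
      have h1 : |c + ts[i - 1] - target| ≤ |c + s - target| := by
        rw [dL _ haLe, dL _ (hallL s hsm)]; have := haMax s hsm; linarith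
      linarith
  · -- only the right neighbour: i = 0
    have hb : ts.getD i 0 = ts[i] := List.getD_eq_getElem ts 0 hl
    have hbGt : target - c < ts[i] := haft i hl (le_refl i)
    have hbMin : ∀ s ∈ ts, ts[i] ≤ s := by
      intro s hsm; obtain ⟨j, hj, rfl⟩ := memg s hsm
      exact mono i j hl hj (by omega)
    have hallR : ∀ s ∈ ts, target - c < s := fun s hsm => lt_of_lt_of_le hbGt (hbMin s hsm)
    have hbMem : ts[i] ∈ ts := List.getElem_mem hl
    simp only [h0, hl, true_and, false_and, if_false, hb]
    by_cases cdb : |c + ts[i] - target| < |ans - target|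
    · rw [if_pos cdb]
      refine ⟨?_, Or.inr ⟨ts[i], hbMem, rfl, cdb, ?_⟩⟩
      · intro s hsm
        rw [dR _ hbGt, dR _ (hallR s hsm)]
        have := hbMin s hsm; linarith
      · intro s' hs' he
        rw [dR _ hbGt] at he; rw [dR _ (hallR s' hs')] at he; linarith
    · rw [if_neg cdb]
      refine ⟨?_, Or.inl rfl⟩
      intro s hsm
      have h1 : |c + ts[i] - target| ≤ |c + s - target| := by
        rw [dR _ hbGt, dR _ (hallR s hsm)]; have := hbMin s hsm; linarith
      linarith
  · -- empty list
    have hts : ts = [] := by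
      have : ts.length = 0 := by omega
      exact List.eq_nil_of_length_eq_zero this
    simp only [h0, hl, false_and, if_false]
    exact ⟨by simp [hts], Or.inl rfl⟩

-- membership of A's doubled-list set fold: sums of a sublist of the processed list, shifted by a start element
theorem pvMemFoldA (M : List Int) (S : List Int) (x : Int) :
    x ∈ M.foldl (fun S i => pvMergeUnion S (S.map (fun s => s + i))) S ↔
      ∃ s ∈ S, ∃ u : List Int, u.Sublist M ∧ x = s + u.sum := by
  induction M generalizing S with
  | nil => simp
  | cons i M ih =>
    rw [List.foldl_cons, ih]
    constructor
    · rintro ⟨s, hsmem, u, hu, rfl⟩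
      rcases (mem_pvMergeUnion _ _ _).1 hsmem with h | h
      · exact ⟨s, h, u, hu.cons _, rfl⟩
      · obtain ⟨s0, hs0, rfl⟩ := List.mem_map.1 h
        exact ⟨s0, hs0, i :: u, List.Sublist.cons₂ _ hu, by simp; ring⟩
    · rintro ⟨s, hsmem, u, hu, rfl⟩
      rcases List.sublist_cons_iff.1 hu with h | ⟨r, rfl, hr⟩
      · exact ⟨s, (mem_pvMergeUnion _ _ _).2 (Or.inl hsmem), u, h, rfl⟩
      · refine ⟨s + i, (mem_pvMergeUnion _ _ _).2 (Or.inr ?_), r, hr, by simp; ring⟩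
        exact List.mem_map.2 ⟨s, hsmem, rfl⟩

theorem pvFoldA_pairwise (M : List Int) (S : List Int) (h : S.Pairwise (· < ·)) :
    (M.foldl (fun S i => pvMergeUnion S (S.map (fun s => s + i))) S).Pairwise (· < ·) := by
  induction M generalizing S with
  | nil => exact h
  | cons i M ih =>
    exact ih _ (pairwise_pvMergeUnion _ _ h (pairwise_map_add _ _ h))

theorem pvMemSums (L : List Int) (x : Int) :
    x ∈ pvSums L ↔ ∃ u₁ : List Int, u₁.Sublist L ∧ ∃ u₂ : List Int, u₂.Sublist L ∧ x = u₁.sum + u₂.sum := by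
  induction L generalizing x with
  | nil => simp [pvSums]
  | cons t r ih =>
    rw [pvSums]
    simp only [mem_pvMergeUnion, List.mem_map]
    constructor
    · intro h
      rcases h with (h | ⟨s, hsmem, rfl⟩) | ⟨s, hsmem, rfl⟩
      · obtain ⟨u₁, hu₁, u₂, hu₂, rfl⟩ := (ih _).1 h
        exact ⟨u₁, hu₁.cons _, u₂, hu₂.cons _, rfl⟩
      · obtain ⟨u₁, hu₁, u₂, hu₂, rfl⟩ := (ih _).1 hsmem
        exact ⟨t :: u₁, List.Sublist.cons₂ _ hu₁, u₂, hu₂.cons _, by simp; ring⟩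
      · obtain ⟨u₁, hu₁, u₂, hu₂, rfl⟩ := (ih _).1 hsmem
        exact ⟨t :: u₁, List.Sublist.cons₂ _ hu₁, t :: u₂, List.Sublist.cons₂ _ hu₂, by simp; ring⟩
    · rintro ⟨u₁, hu₁, u₂, hu₂, rfl⟩
      rcases List.sublist_cons_iff.1 hu₁ with h₁ | ⟨r₁, rfl, h₁⟩ <;>
        rcases List.sublist_cons_iff.1 hu₂ with h₂ | ⟨r₂, rfl, h₂⟩
      · exact Or.inl (Or.inl ((ih _).2 ⟨u₁, h₁, u₂, h₂, rfl⟩))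
      · exact Or.inl (Or.inr ⟨u₁.sum + r₂.sum, (ih _).2 ⟨u₁, h₁, r₂, h₂, rfl⟩, by simp; ring⟩)
      · exact Or.inl (Or.inr ⟨r₁.sum + u₂.sum, (ih _).2 ⟨r₁, h₁, u₂, h₂, rfl⟩, by simp; ring⟩)
      · exact Or.inr ⟨r₁.sum + r₂.sum, (ih _).2 ⟨r₁, h₁, r₂, h₂, rfl⟩, by simp; ring⟩

theorem pvSums_pairwise (L : List Int) : (pvSums L).Pairwise (· < ·) := by
  induction L with
  | nil => simp [pvSums]
  | cons t r ih =>
    rw [pvSums]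
    exact pairwise_pvMergeUnion _ _
      (pairwise_pvMergeUnion _ _ ih (pairwise_map_add _ _ ih)) (pairwise_map_add _ _ ih)

theorem pvSets_eq (L : List Int) :
    (L ++ L).foldl (fun S i => pvMergeUnion S (S.map (fun s => s + i))) [0] = pvSums L := by
  have hpA : ((L ++ L).foldl (fun S i => pvMergeUnion S (S.map (fun s => s + i))) [0]).Pairwise (· < ·) :=
    pvFoldA_pairwise _ _ (by simp)
  have hpB : (pvSums L).Pairwise (· < ·) := pvSums_pairwise L
  have hmem : ∀ x, x ∈ (L ++ L).foldl (fun S i => pvMergeUnion S (S.map (fun s => s + i))) [0] ↔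
      x ∈ pvSums L := by
    intro x
    rw [List.foldl_append, pvMemFoldA, pvMemSums]
    constructor
    · rintro ⟨s, hsmem, u₂, hu₂, rfl⟩
      obtain ⟨s0, hs0, u₁, hu₁, rfl⟩ := (pvMemFoldA L _ s).1 hsmem
      simp only [List.mem_singleton] at hs0
      exact ⟨u₁, hu₁, u₂, hu₂, by rw [hs0]; ring⟩
    · rintro ⟨u₁, hu₁, u₂, hu₂, rfl⟩
      exact ⟨u₁.sum, (pvMemFoldA L _ _).2 ⟨0, by simp, u₁, hu₁, by ring⟩, u₂, hu₂, rfl⟩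
  have hperm := (List.perm_ext_iff_of_nodup
    (hpA.imp (fun h => ne_of_lt h)) (hpB.imp (fun h => ne_of_lt h))).2 hmem
  exact List.Perm.eq_of_pairwise (fun a b _ _ hab hba => le_antisymm hab hba)
    (hpA.imp (fun h => le_of_lt h)) (hpB.imp (fun h => le_of_lt h)) hperm

theorem closestCost_eq_foldA (baseCosts toppingCosts : List Int) (target : Int) :
    closestCost baseCosts toppingCosts target =
      baseCosts.foldl
        (fun ans c =>
          pvStepA
            (((toppingCosts ++ toppingCosts).foldl
                (fun S i => pvMergeUnion S (S.map (fun s => s + i))) [0]).mergeSort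
              (fun a b => decide (a ≤ b)))
            target ans c)
        1000000007 := rfl

theorem closestCost_alt_eq_foldB (baseCosts toppingCosts : List Int) (target : Int) :
    closestCost_alt baseCosts toppingCosts target =
      baseCosts.foldl (fun ans c => pvStepB (pvSums toppingCosts) target ans c) 1000000007 := rfl

-- ===== VERDICT (by name: the statement is the Claim_ definition above) =====
theorem closestCost_spec : Claim_equal_closestCost := by
  intro baseCosts toppingCosts target _
  unfold Spec_closestCost
  rw [closestCost_eq_foldA, closestCost_alt_eq_foldB, pvSets_eq toppingCosts,
    List.mergeSort_eq_self LE.le ((pvSums_pairwise toppingCosts).imp (fun h => le_of_lt h))]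
  set ts := pvSums toppingCosts with hts
  have hsorted : ts.Pairwise (· ≤ ·) := (pvSums_pairwise toppingCosts).imp (fun h => le_of_lt h)
  have hstep : ∀ ans c, pvStepA ts target ans c = pvStepB ts target ans c := fun ans c =>
    pvGood_unique (pvStepA_good ts c target ans hsorted) (pvStepB_good ts c target ans hsorted)
  simp only [hstep]
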